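-- pv_equiv track=rewrite | github.com/KevinZhou92/Lintcode-Python | 1821_min-deletions-to-obtain-string-in-right-format/min-deletions-to-obtain-string-in-right-format.py | minDeletionsToObtainStringInRightFormat
-- ===== SOURCE A (Python) =====
-- def minDeletionsToObtainStringInRightFormat(s):
--     # write your code here
--     if not s:
--         return 0
--
--     left_B, right_A = 0, sum([1 for char in s if char == 'A'])
--     deletions = right_A
--     for i in range(len(s)):
--         if s[i] == 'A':
--             right_A -= 1
--         else:
--             left_B += 1
--         deletions = min(deletions, right_A + left_B)
--
--     return deletions
-- ===== SOURCE B (Python) =====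
-- def minDeletionsToObtainStringInRightFormat(s):
--     deletions = 0
--     b_count = 0
--     for c in s:
--         if c == 'A':
--             deletions = min(deletions + 1, b_count)
--         else:
--             b_count += 1
--     return deletions
-- ===== Notes on version B (the rewrite author's own statement) =====
-- stated objective: faster
-- what changed: Replaces the precomputed total-A count plus running (left_B, right_A) tallies and per-step min over both with the canonical one-pass DP that maintains only the running optimal deletion count and a counter of non-A characters, doing work only on one branch.
import Mathlib
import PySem

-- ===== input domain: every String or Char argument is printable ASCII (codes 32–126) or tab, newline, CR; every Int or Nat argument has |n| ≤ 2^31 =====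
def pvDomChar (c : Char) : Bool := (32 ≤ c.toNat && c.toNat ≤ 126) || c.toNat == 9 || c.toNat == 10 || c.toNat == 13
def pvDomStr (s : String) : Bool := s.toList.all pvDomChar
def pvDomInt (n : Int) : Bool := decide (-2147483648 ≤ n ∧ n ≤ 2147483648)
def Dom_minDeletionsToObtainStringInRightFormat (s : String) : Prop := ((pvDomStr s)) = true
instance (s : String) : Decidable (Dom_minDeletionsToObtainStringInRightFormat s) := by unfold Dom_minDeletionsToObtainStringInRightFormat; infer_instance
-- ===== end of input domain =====

-- B maintains only the running optimal deletion count and a B-counter (canonical one-pass DP),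
-- instead of A's precomputed total-A count with (left_B, right_A) tallies; objective: simpler.

-- ===== PORT A =====
-- one loop step of A: state = (left_B, right_A, deletions)
def pvStepA (st : Int × Int × Int) (c : Char) : Int × Int × Int :=
  let lr := if c = 'A' then (st.1, st.2.1 - 1) else (st.1 + 1, st.2.1)
  (lr.1, lr.2, min st.2.2 (lr.2 + lr.1))

def minDeletionsToObtainStringInRightFormat (s : String) : Int :=
  if s.toList = [] then 0
  else
    -- sum([1 for char in s if char == 'A'])
    let right_A : Int := ((s.toList.filterMap (fun c => if c = 'A' then some (1 : Int) else none)).sum)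
    (s.toList.foldl pvStepA (0, right_A, right_A)).2.2

-- ===== PORT B =====
-- one loop step of B: state = (deletions, b_count)
def pvStepB (st : Int × Int) (c : Char) : Int × Int :=
  if c = 'A' then (min (st.1 + 1) st.2, st.2) else (st.1, st.2 + 1)

def minDeletionsToObtainStringInRightFormat_alt (s : String) : Int :=
  (s.toList.foldl pvStepB (0, 0)).1

-- ===== PRECONDITION & SPEC =====
def Spec_minDeletionsToObtainStringInRightFormat (s : String) (out : Int) : Prop := out = minDeletionsToObtainStringInRightFormat_alt s
instance (s : String) (out : Int) : Decidable (Spec_minDeletionsToObtainStringInRightFormat s out) := by unfold Spec_minDeletionsToObtainStringInRightFormat; infer_instance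

-- ===== CLAIM (what is proved, stated in full; the proofs are below) =====
def Claim_equal_minDeletionsToObtainStringInRightFormat : Prop := ∀ (s : String), Dom_minDeletionsToObtainStringInRightFormat s → Spec_minDeletionsToObtainStringInRightFormat s (minDeletionsToObtainStringInRightFormat s)

-- ===== LEMMAS AND PROOFS =====

-- number of 'A's in a list, as an Int
def pvCntA : List Char → Int
  | [] => 0
  | c :: r => (if c = 'A' then 1 else 0) + pvCntA r

lemma pvCntA_eq_sum (l : List Char) :
    ((l.filterMap (fun c => if c = 'A' then some (1 : Int) else none)).sum) = pvCntA l := by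
  induction l with
  | nil => simp [pvCntA]
  | cons c r ih =>
    by_cases h : c = 'A' <;> simp [pvCntA, h, ih]

-- Loop invariant: if A's state is (b, cntA r, delB + cntA r) with delB ≤ b (B's state (delB, b)),
-- then after consuming r the two loops' deletion counts agree (shifted by cntA r = 0 at the end).
lemma pv_key (r : List Char) : ∀ (b delB : Int), delB ≤ b →
    (r.foldl pvStepA (b, pvCntA r, delB + pvCntA r)).2.2 = (r.foldl pvStepB (delB, b)).1 := by
  induction r with
  | nil => intro b delB _; simp [pvCntA]
  | cons c r ih =>
    intro b delB hle
    by_cases h : c = 'A'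
    · have h1 : pvStepA (b, pvCntA (c :: r), delB + pvCntA (c :: r)) c
          = (b, pvCntA r, min (delB + 1) b + pvCntA r) := by
        simp [pvStepA, pvCntA, h]
        omega
      have h2 : pvStepB (delB, b) c = (min (delB + 1) b, b) := by
        simp [pvStepB, h]
      rw [List.foldl_cons, List.foldl_cons, h1, h2]
      exact ih b (min (delB + 1) b) (by omega)
    · have h1 : pvStepA (b, pvCntA (c :: r), delB + pvCntA (c :: r)) c
          = (b + 1, pvCntA r, delB + pvCntA r) := by
        simp [pvStepA, pvCntA, h]
        omega
      have h2 : pvStepB (delB, b) c = (delB, b + 1) := by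
        simp [pvStepB, h]
      rw [List.foldl_cons, List.foldl_cons, h1, h2]
      exact ih (b + 1) delB (by omega)

-- ===== VERDICT (by name: the statement is the Claim_ definition above) =====
theorem minDeletionsToObtainStringInRightFormat_spec : Claim_equal_minDeletionsToObtainStringInRightFormat := by
  intro s _
  unfold Spec_minDeletionsToObtainStringInRightFormat
  unfold minDeletionsToObtainStringInRightFormat minDeletionsToObtainStringInRightFormat_alt
  by_cases hs : s.toList = []
  · simp [hs]
  · simp only [hs, pvCntA_eq_sum]
    have := pv_key s.toList 0 0 (le_refl 0)
    simpa using this
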